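-- pv_equiv track=rewrite | github.com/MrBrantCode/unitest_baseline | mut_generate/mist_train_taco/taco_862/solution.py | count_good_sequences
-- ===== SOURCE A (Python) =====
-- def count_good_sequences(n, k):
--     MODULO = 1000000007
--
--     def C(n, k):
--         w = 1
--         for i in range(n - k + 1, n + 1):
--             w *= i
--         for i in range(1, k + 1):
--             w //= i
--         return w
--
--     def multiples(limit):
--         tmp = 1
--         m = limit
--         for j in range(2, limit + 1):
--             no_multiples = 0
--             while m % j == 0:
--                 no_multiples += 1
--                 m //= j
--             if no_multiples:
--                 tmp *= C(no_multiples + k - 1, no_multiples)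
--         return tmp
--
--     total = 0
--     for i in range(1, n + 1):
--         total += multiples(i)
--
--     return total % MODULO
-- ===== SOURCE B (Python) =====
-- def count_good_sequences(n, k):
--     MODULO = 1000000007
--
--     def C(a, b):
--         w = 1
--         for i in range(a - b + 1, a + 1):
--             w *= i
--         for i in range(1, b + 1):
--             w //= i
--         return w
--
--     # f[i] = product over prime powers p^e || i of C(e + k - 1, e), built by
--     # dynamic programming: factor out only the SMALLEST prime power of i and
--     # reuse the already-computed value of the cofactor.
--     f = [0, 1]
--     total = 0
--     for i in range(1, n + 1):
--         if i >= 2: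
--             d = 2
--             while d * d <= i and i % d != 0:
--                 d += 1
--             p = d if d * d <= i else i
--             e = 0
--             m = i
--             while m % p == 0:
--                 e += 1
--                 m //= p
--             f.append(f[m] * C(e + k - 1, e))
--         total += f[i]
--     return total % MODULO
-- ===== Notes on version B (the rewrite author's own statement) =====
-- stated objective: faster
-- what changed: A re-factorizes every i from scratch by trial-stripping every j in 2..i (O(n^2)); B builds a dynamic-programming table f[i] = f[i/p^e]*C(e+k-1,e) where p is i's smallest prime factor found by trial division up to sqrt(i), so each i costs O(sqrt(i)) instead of O(i).
import Mathlib
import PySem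

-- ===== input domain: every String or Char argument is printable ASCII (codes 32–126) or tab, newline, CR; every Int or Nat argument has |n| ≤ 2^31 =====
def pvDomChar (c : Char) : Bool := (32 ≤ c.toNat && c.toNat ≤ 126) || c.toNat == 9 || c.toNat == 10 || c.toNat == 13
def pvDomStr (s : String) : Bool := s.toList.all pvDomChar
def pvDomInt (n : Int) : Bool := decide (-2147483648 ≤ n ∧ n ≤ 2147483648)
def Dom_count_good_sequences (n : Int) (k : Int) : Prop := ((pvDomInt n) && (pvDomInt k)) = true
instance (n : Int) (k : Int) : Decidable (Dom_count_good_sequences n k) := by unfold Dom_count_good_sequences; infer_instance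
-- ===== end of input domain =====

-- B replaces A's per-i full trial factorization (j = 2..i for every i) by a DP table
-- f[i] = f[i / p^e] * C(e+k-1, e) with p = smallest prime factor of i found by trial
-- division up to sqrt(i); return values agree on all inputs (objective: faster).

-- ===== PORT A =====
-- helper C(n, k) of the Python (textually identical in A and B; shared)
def cgsC (a b : Int) : Int :=
  let w : Int := (PySem.List.pyRange (a - b + 1) (a + 1) 1).foldl (fun w i => w * i) 1
  (PySem.List.pyRange 1 (b + 1) 1).foldl (fun w i => PySem.Int.floordiv w i) w

-- 'while m % j == 0: c += 1; m //= j' — this exact while loop occurs in both A and B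
-- (shared); fuel only guards termination, it is never exhausted on the executed inputs
def pyStrip (j : Int) : Int → Int → Nat → Int × Int
  | c, m, 0 => (c, m)
  | c, m, fuel + 1 =>
    if PySem.Int.mod m j = 0 then pyStrip j (c + 1) (PySem.Int.floordiv m j) fuel
    else (c, m)

def cgsMultiples (k limit : Int) : Int :=
  ((PySem.List.pyRange 2 (limit + 1) 1).foldl
    (fun (s : Int × Int) j =>
      let r := pyStrip j 0 s.2 (s.2.toNat + 1)
      if r.1 ≠ 0 then (s.1 * cgsC (r.1 + k - 1) r.1, r.2) else (s.1, r.2))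
    (1, limit)).1

def count_good_sequences (n : Int) (k : Int) : Int :=
  PySem.Int.mod
    ((PySem.List.pyRange 1 (n + 1) 1).foldl (fun t i => t + cgsMultiples k i) 0)
    1000000007

-- ===== PORT B =====
-- 'while d*d <= i and i % d != 0: d += 1' (fuel = termination guard only)
def altFindD (i : Int) : Int → Nat → Int
  | d, 0 => d
  | d, fuel + 1 =>
    if d * d ≤ i ∧ PySem.Int.mod i d ≠ 0 then altFindD i (d + 1) fuel else d

def count_good_sequences_alt (n : Int) (k : Int) : Int :=
  PySem.Int.mod
    (((PySem.List.pyRange 1 (n + 1) 1).foldl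
      (fun (s : List Int × Int) i =>
        let f := s.1
        let f :=
          if 2 ≤ i then
            let d := altFindD i 2 (i.toNat + 2)
            let p := if d * d ≤ i then d else i
            let r := pyStrip p 0 i (i.toNat + 1)
            f ++ [PySem.List.pyGetD f r.2 0 * cgsC (r.1 + k - 1) r.1]
          else f
        (f, s.2 + PySem.List.pyGetD f i 0))
      ([0, 1], 0)).2)
    1000000007

-- ===== PRECONDITION & SPEC =====
def Spec_count_good_sequences (n : Int) (k : Int) (out : Int) : Prop := out = count_good_sequences_alt n k
instance (n : Int) (k : Int) (out : Int) : Decidable (Spec_count_good_sequences n k out) := by unfold Spec_count_good_sequences; infer_instance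

-- ===== CLAIM (what is proved, stated in full; the proofs are below) =====
def Claim_equal_count_good_sequences : Prop := ∀ (n : Int) (k : Int), Dom_count_good_sequences n k → Spec_count_good_sequences n k (count_good_sequences n k)

-- ===== LEMMAS AND PROOFS =====

-- the common value: product over the prime factorization of C(e+k-1, e)
def specF (k : Int) (m : Nat) : Int :=
  m.factorization.prod (fun _ e => cgsC ((e : Int) + k - 1) (e : Int))

lemma cgsC_zero (k : Int) : cgsC (0 + k - 1) 0 = 1 := by
  simp [cgsC]

lemma specF_one (k : Int) : specF k 1 = 1 := by
  simp [specF]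

lemma specF_step (k : Int) (p e m : Nat) (hp : p.Prime) (he : 1 ≤ e) (hm : 0 < m)
    (hnd : ¬ p ∣ m) :
    specF k (p ^ e * m) = cgsC ((e : Int) + k - 1) (e : Int) * specF k m := by
  unfold specF
  rw [Nat.factorization_mul (pow_ne_zero e hp.ne_zero) (by omega), hp.factorization_pow]
  rw [Finsupp.prod_add_index_of_disjoint]
  · congr 1
    rw [Finsupp.prod_single_index]
    have := cgsC_zero k
    simpa using this
  · rw [Finsupp.support_single_ne_zero _ (by omega)]
    simp only [Finset.disjoint_singleton_left, Nat.support_factorization]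
    exact fun h => hnd (Nat.dvd_of_mem_primeFactors h)

lemma strip_spec (j : Int) (hj : 2 ≤ j) :
    ∀ (fuel : Nat) (m c : Int), 0 < m → m.toNat ≤ fuel →
      ∃ (e : Nat) (m' : Int), pyStrip j c m fuel = (c + (e : Int), m') ∧
        m = m' * j ^ e ∧ ¬ j ∣ m' ∧ 0 < m' := by
  intro fuel
  induction fuel with
  | zero => intro m c hm hf; omega
  | succ fuel ih =>
    intro m c hm hf
    by_cases hd : j ∣ m
    · have hmod : PySem.Int.mod m j = 0 := (PySem.Int.mod_eq_zero_iff_dvd m j).mpr hd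
      have hfd : PySem.Int.floordiv m j = m / j := PySem.Int.floordiv_eq_ediv_of_pos (by omega)
      have hmj : m / j * j = m := Int.ediv_mul_cancel hd
      have hm2 : 0 < m / j := Int.ediv_pos_of_pos_of_dvd hm (by omega) hd
      have hlt : m / j < m := by nlinarith [hmj]
      obtain ⟨e, m', heq, hfac, hnd, hm'⟩ := ih (m / j) (c + 1) hm2 (by omega)
      refine ⟨e + 1, m', ?_, ?_, hnd, hm'⟩
      · simp only [pyStrip, hmod, if_true, hfd, heq]
        have : c + 1 + (e : Int) = c + ((e : Nat) + 1 : Nat) := by push_cast; ring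
        rw [this]
      · rw [← hmj, hfac]; ring
    · refine ⟨0, m, ?_, by simp, hd, hm⟩
      have hmod : PySem.Int.mod m j ≠ 0 := by
        rw [Ne, PySem.Int.mod_eq_zero_iff_dvd]; exact hd
      simp [pyStrip, hmod]

lemma strip_nodvd (j : Int) (c m : Int) (fuel : Nat) (hj : 0 < j) (hnd : ¬ j ∣ m) :
    pyStrip j c m fuel = (c, m) := by
  have hmod : PySem.Int.mod m j ≠ 0 := by
    rw [Ne, PySem.Int.mod_eq_zero_iff_dvd]; exact hnd
  cases fuel <;> simp [pyStrip, hmod]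

-- A's j-loop: once every prime factor of m is ≥ j, the loop multiplies tmp by specF m
lemma multiples_loop (k : Int) :
    ∀ (fuel : Nat) (j L tmp : Int) (m : Nat), (L + 1 - j).toNat ≤ fuel →
      2 ≤ j → 0 < m → (m : Int) ≤ L →
      (∀ p : Nat, p.Prime → p ∣ m → j ≤ (p : Int)) →
      ((PySem.List.pyRange j (L + 1) 1).foldl
        (fun (s : Int × Int) j' =>
          let r := pyStrip j' 0 s.2 (s.2.toNat + 1)
          if r.1 ≠ 0 then (s.1 * cgsC (r.1 + k - 1) r.1, r.2) else (s.1, r.2))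
        (tmp, (m : Int))).1 = tmp * specF k m := by
  intro fuel
  induction fuel with
  | zero =>
    intro j L tmp m hf hj hm hmL hfac
    have hnil : PySem.List.pyRange j (L + 1) 1 = [] :=
      PySem.List.pyRange_one_eq_nil (by omega)
    have hm1 : m = 1 := by
      rw [Nat.eq_one_iff_not_exists_prime_dvd]
      intro p hp hpd
      have h1 := hfac p hp hpd
      have h2 : (p : Int) ≤ (m : Int) := by exact_mod_cast Nat.le_of_dvd hm hpd
      omega
    subst hm1
    simp [hnil, specF_one]
  | succ fuel ih =>
    intro j L tmp m hf hj hm hmL hfac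
    by_cases hjL : L + 1 ≤ j
    · have hnil : PySem.List.pyRange j (L + 1) 1 = [] :=
        PySem.List.pyRange_one_eq_nil hjL
      have hm1 : m = 1 := by
        rw [Nat.eq_one_iff_not_exists_prime_dvd]
        intro p hp hpd
        have h1 := hfac p hp hpd
        have h2 : (p : Int) ≤ (m : Int) := by exact_mod_cast Nat.le_of_dvd hm hpd
        omega
      subst hm1
      simp [hnil, specF_one]
    · rw [not_le] at hjL
      rw [PySem.List.pyRange_one_cons (by omega)]
      simp only [List.foldl_cons]
      by_cases hd : j ∣ (m : Int)
      · -- j divides m: j must be prime; strip it completely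
        set jn := j.toNat with hjn
        have hjcast : (jn : Int) = j := Int.toNat_of_nonneg (by omega)
        have hjdn : jn ∣ m := by
          have := Int.natCast_dvd_natCast.mp (hjcast ▸ hd)
          exact this
        have hjp : jn.Prime := by
          rw [Nat.prime_def_lt]
          constructor
          · omega
          · intro q hq hqd
            by_contra hq1
            obtain ⟨r, hr, hrd⟩ := Nat.exists_prime_and_dvd hq1
            have hrm : r ∣ m := (hrd.trans hqd).trans hjdn
            have h1 := hfac r hr hrm
            have h2 : r ≤ q := Nat.le_of_dvd (by
              rcases Nat.eq_zero_or_pos q with h | h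
              · subst h; simp at hqd; omega
              · exact h) hrd
            have : (r : Int) ≤ (q : Int) := by exact_mod_cast h2
            have : (q : Int) < j := by
              have := hq
              omega
            omega
        obtain ⟨e, m', heq, hfacm, hnd, hm'⟩ :=
          strip_spec j hj ((m : Int).toNat + 1) (m : Int) 0 (by exact_mod_cast hm) (by simp)
        have he : 1 ≤ e := by
          rcases Nat.eq_zero_or_pos e with h | h
          · subst h; simp at hfacm; subst hfacm; exact absurd hd hnd
          · exact h
        -- m' as a Nat
        set m'n := m'.toNat with hm'n
        have hm'cast : (m'n : Int) = m' := Int.toNat_of_nonneg (by omega)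
        have hfacn : m = jn ^ e * m'n := by
          have : (m : Int) = (m'n : Int) * (jn : Int) ^ e := by rw [hm'cast, hjcast]; exact hfacm
          exact_mod_cast (by rw [this]; push_cast; ring : (m : Int) = ((jn ^ e * m'n : Nat) : Int))
        have hndn : ¬ jn ∣ m'n := by
          intro h
          exact hnd (by rw [← hm'cast, ← hjcast]; exact_mod_cast h)
        have hm'pos : 0 < m'n := by omega
        rw [heq]
        have he0 : ¬ ((e : Int) = 0) := by
          have : (1 : Int) ≤ (e : Int) := by exact_mod_cast he
          omega
        simp only [zero_add]
        rw [if_pos he0]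
        have hstep : ∀ p : Nat, p.Prime → p ∣ m'n → j + 1 ≤ (p : Int) := by
          intro p hp hpd
          have hpm : p ∣ m := by rw [hfacn]; exact hpd.mul_left _
          have h1 := hfac p hp hpm
          rcases eq_or_lt_of_le h1 with h | h
          · exfalso
            have : (p : Int) = (jn : Int) := by omega
            have hpj : p = jn := by exact_mod_cast this
            exact hndn (hpj ▸ hpd)
          · omega
        have hm'le : (m'n : Int) ≤ L := by
          have h1 : m'n ≤ m := by
            rw [hfacn]
            calc m'n = 1 * m'n := by ring
            _ ≤ jn ^ e * m'n := by
              apply Nat.mul_le_mul_right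
              exact Nat.one_le_pow _ _ (by omega)
          have : (m'n : Int) ≤ (m : Int) := by exact_mod_cast h1
          omega
        have := ih (j + 1) L (tmp * cgsC ((e : Int) + k - 1) (e : Int)) m'n
          (by omega) (by omega) hm'pos hm'le hstep
        rw [hm'cast] at this
        rw [this]
        rw [hfacn, specF_step k jn e m'n hjp he hm'pos hndn]
        ring
      · -- j does not divide m: nothing happens, factors now all ≥ j+1
        rw [strip_nodvd j 0 (m : Int) _ (by omega) hd]
        simp only [ne_eq, not_true_eq_false]
        have hstep : ∀ p : Nat, p.Prime → p ∣ m → j + 1 ≤ (p : Int) := by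
          intro p hp hpd
          have h1 := hfac p hp hpd
          rcases eq_or_lt_of_le h1 with h | h
          · exfalso
            apply hd
            have hpj : (p : Int) = j := h.symm
            rw [← hpj]
            exact_mod_cast Nat.cast_dvd_cast hpd
          · omega
        exact ih (j + 1) L tmp m (by omega) (by omega) hm hmL hstep

lemma multiplesA_eq (k : Int) (i : Nat) (hi : 1 ≤ i) :
    cgsMultiples k (i : Int) = specF k i := by
  unfold cgsMultiples
  have := multiples_loop k ((i : Int) + 1 - 2).toNat 2 (i : Int) 1 i (le_refl _)
    (by omega) (by omega) (by omega)
    (fun p hp _ => by exact_mod_cast hp.two_le)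
  rw [this]
  ring

-- B's trial loop characterization
lemma findD_spec (i : Int) (hi : 0 < i) :
    ∀ (fuel : Nat) (d : Int), 2 ≤ d → (i + 1 - d).toNat ≤ fuel →
      ∃ dr : Int, altFindD i d fuel = dr ∧ d ≤ dr ∧
        (¬ (dr * dr ≤ i) ∨ dr ∣ i) ∧
        (∀ c, d ≤ c → c < dr → ¬ c ∣ i) := by
  intro fuel
  induction fuel with
  | zero =>
    intro d hd hf
    have hdi : i + 1 ≤ d := by omega
    refine ⟨d, rfl, le_refl _, Or.inl ?_, fun c h1 h2 => absurd (h1.trans_lt h2).le (by omega)⟩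
    nlinarith
  | succ fuel ih =>
    intro d hd hf
    by_cases hc : d * d ≤ i ∧ PySem.Int.mod i d ≠ 0
    · have hnd : ¬ d ∣ i := by
        intro h
        exact hc.2 ((PySem.Int.mod_eq_zero_iff_dvd _ _).mpr h)
      have hdi : d ≤ i := by nlinarith [hc.1]
      obtain ⟨dr, heq, hle, hstop, hmin⟩ := ih (d + 1) (by omega) (by omega)
      refine ⟨dr, ?_, by omega, hstop, ?_⟩
      · simp only [altFindD, if_pos hc]; exact heq
      · intro c h1 h2
        rcases eq_or_lt_of_le h1 with h | h
        · exact h ▸ hnd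
        · exact hmin c (by omega) h2
    · refine ⟨d, ?_, le_refl _, ?_, fun c h1 h2 => absurd h1 (by omega)⟩
      · simp only [altFindD, if_neg hc]
      · by_cases h : d * d ≤ i
        · right
          rw [← PySem.Int.mod_eq_zero_iff_dvd]
          by_contra hne
          exact hc ⟨h, hne⟩
        · exact Or.inl h

-- the p computed by B's body is the smallest prime factor of i (as an Int)
lemma altP_eq_minFac (i : Nat) (hi : 2 ≤ i) :
    (if altFindD (i : Int) 2 (i + 2) * altFindD (i : Int) 2 (i + 2) ≤ (i : Int)
     then altFindD (i : Int) 2 (i + 2) else (i : Int)) = (i.minFac : Int) := by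
  obtain ⟨dr, heq, hle, hstop, hmin⟩ :=
    findD_spec (i : Int) (by omega) (i + 2) 2 (by omega) (by omega)
  rw [heq]
  split_ifs with h
  · -- dr divides i and is minimal: dr = minFac i
    have hdvd : dr ∣ (i : Int) := hstop.resolve_left (by omega)
    set drn := dr.toNat with hdrn
    have hcast : (drn : Int) = dr := Int.toNat_of_nonneg (by omega)
    have hdvdn : drn ∣ i := by
      have := hdvd; rw [← hcast] at this; exact_mod_cast this
    have h1 : i.minFac ≤ drn := Nat.minFac_le_of_dvd (by omega) hdvdn
    have h2 : ¬ (i.minFac : Int) < dr := by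
      intro hlt
      have hge2 : 2 ≤ (i.minFac : Int) := by
        exact_mod_cast (Nat.minFac_prime (by omega)).two_le
      exact hmin (i.minFac : Int) hge2 hlt (by exact_mod_cast i.minFac_dvd)
    have : (i.minFac : Int) ≤ (drn : Int) := by exact_mod_cast h1
    omega
  · -- no divisor up to sqrt: i is prime
    have hprime : i.Prime := by
      by_contra hnp
      have hq := Nat.minFac_sq_le_self (by omega : 0 < i) hnp
      have hq2 : 2 ≤ (i.minFac : Int) := by
        exact_mod_cast (Nat.minFac_prime (by omega)).two_le
      have hqle : (i.minFac : Int) * (i.minFac : Int) ≤ (i : Int) := by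
        have : (i.minFac * i.minFac : Nat) ≤ i := by
          have := hq; rw [pow_two] at this; exact this
        exact_mod_cast this
      have hqdr : ¬ (i.minFac : Int) < dr :=
        fun hlt => hmin _ hq2 hlt (by exact_mod_cast i.minFac_dvd)
      rw [not_lt] at hqdr
      nlinarith
    rw [hprime.minFac_eq]

-- the table after B has processed 1..N  (N ≥ 1)
def fTable (k : Int) (N : Nat) : List Int :=
  0 :: (List.range N).map (fun t => specF k (t + 1))

lemma fTable_get (k : Int) (N t : Nat) (h1 : 1 ≤ t) (h2 : t ≤ N) :
    PySem.List.pyGetD (fTable k N) (t : Int) 0 = specF k t := by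
  rw [PySem.List.pyGetD_natCast]
  unfold fTable
  rcases Nat.exists_eq_add_of_le h1 with ⟨t', rfl⟩
  rw [show 1 + t' = t' + 1 by omega, List.getD_cons_succ,
    List.getD_eq_getElem _ _ (by simpa using by omega),
    List.getElem_map, List.getElem_range, Nat.add_comm]

-- B's body, named for the invariant proof
def altBody (k : Int) (s : List Int × Int) (i : Int) : List Int × Int :=
  let f := s.1
  let f :=
    if 2 ≤ i then
      let d := altFindD i 2 (i.toNat + 2)
      let p := if d * d ≤ i then d else i
      let r := pyStrip p 0 i (i.toNat + 1)
      f ++ [PySem.List.pyGetD f r.2 0 * cgsC (r.1 + k - 1) r.1]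
    else f
  (f, s.2 + PySem.List.pyGetD f i 0)

lemma alt_invariant (k : Int) (N : Nat) (hN : 1 ≤ N) :
    (PySem.List.pyRange 1 ((N : Int) + 1) 1).foldl (altBody k) ([0, 1], 0) =
      (fTable k N, ((List.range N).map (fun t => specF k (t + 1))).sum) := by
  induction N with
  | zero => omega
  | succ N ih =>
    rcases Nat.eq_zero_or_pos N with h | h
    · subst h
      rw [show ((1 : Nat) : Int) + 1 = 1 + 1 by norm_num, PySem.List.pyRange_one_singleton]
      have hb : altBody k ([0, 1], 0) 1 = ([0, 1], 1) := by
        simp [altBody, PySem.List.pyGetD]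
      simp only [List.foldl_cons, List.foldl_nil, hb, fTable]
      simp [specF_one]
    · rw [show ((N + 1 : Nat) : Int) + 1 = ((N : Int) + 1) + 1 by push_cast; ring,
        PySem.List.pyRange_one_succ_right (by omega), List.foldl_append, ih h]
      simp only [List.foldl_cons, List.foldl_nil]
      -- process i = N + 1 ≥ 2
      have hi2 : (2 : Int) ≤ (N : Int) + 1 := by omega
      have hcastN1 : ((N : Int) + 1) = ((N + 1 : Nat) : Int) := by push_cast; ring
      rw [hcastN1]
      have htoNat : (((N + 1 : Nat) : Int)).toNat = N + 1 := by simp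
      have hcond : (2 : Int) ≤ ((N + 1 : Nat) : Int) := by exact_mod_cast hi2.trans_eq hcastN1
      -- p = minFac (N+1)
      have hp := altP_eq_minFac (N + 1) (by omega)
      simp only [altBody, htoNat, eq_true hcond, if_true, hp]
      set P := (N + 1).minFac with hP
      have hPp : P.Prime := Nat.minFac_prime (by omega)
      have hPd : (P : Int) ∣ ((N + 1 : Nat) : Int) := by exact_mod_cast (N + 1).minFac_dvd
      obtain ⟨e, m', heq, hfac, hnd, hm'⟩ := strip_spec (P : Int) (by exact_mod_cast hPp.two_le)
        (N + 1 + 1) ((N + 1 : Nat) : Int) 0 (by positivity) (by omega)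
      rw [heq]
      simp only [zero_add]
      set m'n := m'.toNat with hm'n
      have hm'cast : (m'n : Int) = m' := Int.toNat_of_nonneg (by omega)
      have he : 1 ≤ e := by
        rcases Nat.eq_zero_or_pos e with h0 | h0
        · exfalso
          subst h0
          simp only [pow_zero, mul_one] at hfac
          rw [← hfac] at hnd
          exact hnd hPd
        · exact h0
      have hfacn : N + 1 = P ^ e * m'n := by
        have : ((N + 1 : Nat) : Int) = (m'n : Int) * (P : Int) ^ e := by rw [hm'cast]; exact hfac
        exact_mod_cast (by rw [this]; push_cast; ring : ((N + 1 : Nat) : Int) = ((P ^ e * m'n : Nat) : Int))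
      have hndn : ¬ P ∣ m'n := by
        intro h
        exact hnd (by rw [← hm'cast]; exact_mod_cast h)
      have hm'pos : 0 < m'n := by omega
      have hm'le : m'n ≤ N := by
        have h1 : P ^ e ≥ 2 := by
          calc 2 = 2 ^ 1 := by norm_num
          _ ≤ P ^ e := Nat.pow_le_pow_left hPp.two_le e |>.trans' (by
            exact Nat.pow_le_pow_right (by omega) he) |>.trans (le_refl _)
        have : 2 * m'n ≤ P ^ e * m'n := Nat.mul_le_mul_right _ h1
        omega
      -- lookup f[m'] in fTable k N
      have hlook : PySem.List.pyGetD (fTable k N) m' 0 = specF k m'n := by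
        rw [← hm'cast]
        exact fTable_get k N m'n hm'pos hm'le
      rw [hlook]
      have hnewf : fTable k N ++ [specF k m'n * cgsC ((e : Int) + k - 1) (e : Int)] =
          fTable k (N + 1) := by
        unfold fTable
        rw [List.range_succ, List.map_append]
        simp only [List.map_cons, List.map_nil, List.cons_append]
        congr 2
        rw [show N + 1 = P ^ e * m'n from hfacn,
          specF_step k P e m'n hPp he hm'pos hndn]
        ring
      rw [hnewf]
      congr 1
      rw [fTable_get k (N + 1) (N + 1) (by omega) (by omega)]
      rw [List.range_succ, List.map_append, List.sum_append]
      simp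

-- A's sum
lemma a_sum (n k : Int) (hn : 0 < n) :
    (PySem.List.pyRange 1 (n + 1) 1).foldl (fun t i => t + cgsMultiples k i) 0 =
      ((List.range n.toNat).map (fun t => specF k (t + 1))).sum := by
  rw [PySem.List.foldl_add, PySem.List.pyRange_one 1 (n + 1),
    show (n + 1 - 1 : Int) = n by ring, List.map_map, zero_add]
  apply congrArg
  apply List.map_congr_left
  intro t ht
  simp only [Function.comp_apply]
  rw [show (1 + (t : Int)) = ((t + 1 : Nat) : Int) by push_cast; ring]
  exact multiplesA_eq k (t + 1) (by omega)

-- B's port, re-stated through the named body (definitional)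
lemma alt_eq_body (n k : Int) :
    count_good_sequences_alt n k =
      PySem.Int.mod
        (((PySem.List.pyRange 1 (n + 1) 1).foldl (altBody k) ([0, 1], 0)).2) 1000000007 := rfl

-- ===== VERDICT (by name: the statement is the Claim_ definition above) =====
theorem count_good_sequences_spec : Claim_equal_count_good_sequences := by
  intro n k _
  unfold Spec_count_good_sequences
  rw [alt_eq_body]
  unfold count_good_sequences
  by_cases hn : 0 < n
  · rw [a_sum n k hn]
    rw [show (n + 1 : Int) = ((n.toNat : Int) + 1) by omega]
    rw [alt_invariant k n.toNat (by omega)]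
  · have hnil : PySem.List.pyRange 1 (n + 1) 1 = [] :=
      PySem.List.pyRange_one_eq_nil (by omega)
    simp [hnil]
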